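-- pv_equiv track=rewrite | github.com/arnoldfini/namra | form-data/changecsv.py | iterstr
-- ===== SOURCE A (Python) =====
-- def iterstr(string):
--
--     # Value to check wether it has iterated a comma before
--     value = 0
--
--     # Array to store multiple atributes that are in a single cell
--     atrib = []
--
--     # Function only works if there is a comma to separate words, otherwise it returns the input (because there is only one word)
--     try:
--
--         for i in range(len(string)):
--
--             if string[i] == ',' and value == 0:
--
--                 atrib.append(string[:i])
--
--                 tmp = i
--
--                 value += 1
--
--             elif string[i] == ',' and value >= 1:
--
--                 atrib.append(string[tmp + 2:i])
--
--                 tmp = i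
--
--         atrib.append(string[tmp+2:len(string)])
--
--         return atrib
--
--     except:
--
--         atrib.append(string)
--
--         return atrib
-- ===== SOURCE B (Python) =====
-- def iterstr(string):
--     # Two-pass: collect all comma positions first, then cut the segments directly
--     # (prefix up to the first comma, between consecutive commas skipping ", ", tail after the last).
--     positions = [i for i in range(len(string)) if string[i] == ',']
--     if not positions:
--         return [string]
--     return ([string[:positions[0]]]
--             + [string[a + 2:b] for a, b in zip(positions, positions[1:])]
--             + [string[positions[-1] + 2:len(string)]])
-- ===== Notes on version B (the rewrite author's own statement) =====
-- stated objective: alternative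
-- what changed: Replaced A's single-pass state machine (value flag, tmp index, incremental appends inside the loop, try/except for the no-comma case) by a two-pass decomposition: first collect all comma positions, then cut the prefix, the zip-of-consecutive-positions middle segments and the tail directly.
import Mathlib
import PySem

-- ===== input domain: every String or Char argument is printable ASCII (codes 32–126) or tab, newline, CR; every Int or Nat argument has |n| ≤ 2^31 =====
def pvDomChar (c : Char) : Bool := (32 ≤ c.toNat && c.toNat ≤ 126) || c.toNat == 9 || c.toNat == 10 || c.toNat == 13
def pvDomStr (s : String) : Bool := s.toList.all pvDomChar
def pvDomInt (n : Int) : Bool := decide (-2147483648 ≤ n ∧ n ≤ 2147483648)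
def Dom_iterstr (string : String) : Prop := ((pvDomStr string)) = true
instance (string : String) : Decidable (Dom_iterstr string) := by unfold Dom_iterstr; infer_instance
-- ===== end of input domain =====

-- B replaces A's one-pass state machine by a two-pass decomposition (comma positions first,
-- then direct segment cuts); same O(n) cost, no behavioural change.

-- ===== PORT A =====
-- A's loop body: state (value, atrib, tmp).  tmp is Option Nat because Python's tmp is unbound
-- before the first comma; the branch reading it is reached only with value ≥ 1, where it is bound
-- (the getD 0 default is never the value read there).
def iterstrStep (s : List Char) (st : Int × List (List Char) × Option Nat) (i : Nat) :
    Int × List (List Char) × Option Nat :=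
  let (value, atrib, tmp) := st
  if s[i]? = some ',' ∧ value = 0 then
    (value + 1, atrib ++ [PySem.List.slice s none (some (i : Int))], some i)
  else if s[i]? = some ',' ∧ 1 ≤ value then
    (value, atrib ++ [PySem.List.slice s (some ((tmp.getD 0 : Int) + 2)) (some (i : Int))], some i)
  else
    (value, atrib, tmp)

def iterstr (string : String) : List String :=
  let s := string.toList
  let r := (List.range s.length).foldl (iterstrStep s) (0, [], none)
  match r.2.2 with
  | none =>   -- tmp never bound: the final append raises NameError, the except appends string
      (r.2.1 ++ [s]).map String.ofList
  | some t =>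
      (r.2.1 ++ [PySem.List.slice s (some ((t : Int) + 2)) (some (s.length : Int))]).map String.ofList

-- ===== PORT B =====
def iterstr_alt (string : String) : List String :=
  let s := string.toList
  let positions := (List.range s.length).filter (fun i => decide (s[i]? = some ','))
  match positions with
  | [] => [string]
  | p0 :: rest =>
      ((PySem.List.slice s none (some (p0 : Int))
          :: ((p0 :: rest).zip rest).map (fun ab =>
                PySem.List.slice s (some ((ab.1 : Int) + 2)) (some (ab.2 : Int))))
        ++ [PySem.List.slice s (some ((rest.getLastD p0 : Int) + 2)) (some (s.length : Int))]).map String.ofList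

-- ===== PRECONDITION & SPEC =====
def Spec_iterstr (string : String) (out : List String) : Prop := out = iterstr_alt string
instance (string : String) (out : List String) : Decidable (Spec_iterstr string out) := by unfold Spec_iterstr; infer_instance

-- ===== CLAIM (what is proved, stated in full; the proofs are below) =====
def Claim_equal_iterstr : Prop := ∀ (string : String), Dom_iterstr string → Spec_iterstr string (iterstr string)

-- ===== LEMMAS AND PROOFS =====

-- the middle segments: slices between consecutive comma positions, previous comma t
def pvChain (s : List Char) : Nat → List Nat → List (List Char)
  | _, [] => []
  | t, q :: qs => PySem.List.slice s (some ((t : Int) + 2)) (some (q : Int)) :: pvChain s q qs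

lemma iterstrStep_skip (s : List Char) (st : Int × List (List Char) × Option Nat) (i : Nat)
    (h : ¬ s[i]? = some ',') : iterstrStep s st i = st := by
  obtain ⟨v, a, t⟩ := st
  simp [iterstrStep, h]

lemma iterstrStep_first (s : List Char) (a : List (List Char)) (i : Nat)
    (h : s[i]? = some ',') :
    iterstrStep s (0, a, none) i = (1, a ++ [PySem.List.slice s none (some (i : Int))], some i) := by
  simp [iterstrStep, h]

lemma iterstrStep_next (s : List Char) (v : Int) (a : List (List Char)) (t i : Nat)
    (hv : 1 ≤ v) (h : s[i]? = some ',') :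
    iterstrStep s (v, a, some t) i
      = (v, a ++ [PySem.List.slice s (some ((t : Int) + 2)) (some (i : Int))], some i) := by
  have hv0 : ¬ v = 0 := by omega
  simp [iterstrStep, h, hv0, hv]

lemma foldl_eq_foldl_filter {α β : Type} (f : β → α → β) (p : α → Bool)
    (h : ∀ b a, p a = false → f b a = b) :
    ∀ (l : List α) (b : β), l.foldl f b = (l.filter p).foldl f b := by
  intro l
  induction l with
  | nil => intro b; rfl
  | cons x xs ih =>
      intro b
      by_cases hx : p x
      · simp [List.filter, hx, ih]
      · simp only [List.foldl_cons, h b x (by simpa using hx)]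
        simp [List.filter, hx, ih]

lemma foldl_step_commas (s : List Char) :
    ∀ (l : List Nat) (v : Int) (a : List (List Char)) (t : Nat), 1 ≤ v →
      (∀ i ∈ l, s[i]? = some ',') →
      l.foldl (iterstrStep s) (v, a, some t) = (v, a ++ pvChain s t l, some (l.getLastD t)) := by
  intro l
  induction l with
  | nil => intro v a t _ _; simp [pvChain]
  | cons q qs ih =>
      intro v a t hv hall
      have hq : s[q]? = some ',' := hall q (List.mem_cons_self)
      rw [List.foldl_cons, iterstrStep_next s v a t q hv hq,
        ih v _ q hv (fun i hi => hall i (List.mem_cons_of_mem _ hi))]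
      cases hL : qs.getLast? with
      | none =>
          have : qs = [] := List.getLast?_eq_none_iff.mp hL
          subst this; simp [pvChain]
      | some y => cases qs <;> simp_all [pvChain]

lemma zipmap_eq_chain (s : List Char) :
    ∀ (l : List Nat) (t : Nat),
      ((t :: l).zip l).map (fun ab : Nat × Nat =>
          PySem.List.slice s (some ((ab.1 : Int) + 2)) (some ((ab.2 : Int)))) = pvChain s t l := by
  intro l
  induction l with
  | nil => intro t; rfl
  | cons q qs ih => intro t; simp [List.zip_cons_cons, pvChain, ih q]

-- ===== VERDICT (by name: the statement is the Claim_ definition above) =====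
theorem iterstr_spec : Claim_equal_iterstr := by
  intro string _
  show iterstr string = iterstr_alt string
  simp only [iterstr, iterstr_alt]
  set s := string.toList with hs
  rw [foldl_eq_foldl_filter (iterstrStep s) (fun i => decide (s[i]? = some ','))
      (fun b i hb => iterstrStep_skip s b i (by simpa using hb))]
  cases hp : (List.range s.length).filter (fun i => decide (s[i]? = some ',')) with
  | nil =>
      show [String.ofList s] = [string]
      rw [hs, String.ofList_toList]
  | cons p0 rest =>
      have hall : ∀ i ∈ p0 :: rest, s[i]? = some ',' := by
        intro i hi
        have : i ∈ (List.range s.length).filter (fun i => decide (s[i]? = some ',')) := hp ▸ hi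
        simpa using (List.mem_filter.mp this).2
      rw [List.foldl_cons, iterstrStep_first s [] p0 (hall p0 List.mem_cons_self),
        foldl_step_commas s rest 1 _ p0 (le_refl 1)
          (fun i hi => hall i (List.mem_cons_of_mem _ hi))]
      simp [zipmap_eq_chain]
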